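-- pv_equiv track=rewrite | github.com/ellenlawrence/algorithm-practice | lemmings.py | furthest
-- ===== SOURCE A (Python) =====
-- def furthest(num_holes, cafes):
--     """Find longest distance between a hole and a cafe."""
--     distances2 = []
--     for hole in range(0, num_holes):
--         distances1 = []
--         for cafe in cafes:
--             distance = abs(hole - cafe)
--             distances1.append(distance)
--         distances2.append(min(distances1))
--
--     return max(distances2)
-- ===== SOURCE B (Python) =====
-- def furthest(num_holes, cafes):
--     """Find longest distance between a hole and a cafe."""
--     cs = sorted(cafes)
--     n = len(cs)
--     best = None
--     for hole in range(num_holes):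
--         lo, hi = 0, n
--         while lo < hi:
--             mid = (lo + hi) // 2
--             if cs[mid] < hole:
--                 lo = mid + 1
--             else:
--                 hi = mid
--         cand = []
--         if lo < n:
--             cand.append(cs[lo] - hole)
--         if lo > 0:
--             cand.append(hole - cs[lo - 1])
--         d = min(cand)
--         if best is None or d > best:
--             best = d
--     return best
-- ===== Notes on version B (the rewrite author's own statement) =====
-- stated objective: faster
-- what changed: A scans all cafes for every hole (nested loops, building distance lists); B sorts the cafes once and finds each hole's nearest cafe by binary search, keeping a running maximum instead of intermediate lists.
import Mathlib
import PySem

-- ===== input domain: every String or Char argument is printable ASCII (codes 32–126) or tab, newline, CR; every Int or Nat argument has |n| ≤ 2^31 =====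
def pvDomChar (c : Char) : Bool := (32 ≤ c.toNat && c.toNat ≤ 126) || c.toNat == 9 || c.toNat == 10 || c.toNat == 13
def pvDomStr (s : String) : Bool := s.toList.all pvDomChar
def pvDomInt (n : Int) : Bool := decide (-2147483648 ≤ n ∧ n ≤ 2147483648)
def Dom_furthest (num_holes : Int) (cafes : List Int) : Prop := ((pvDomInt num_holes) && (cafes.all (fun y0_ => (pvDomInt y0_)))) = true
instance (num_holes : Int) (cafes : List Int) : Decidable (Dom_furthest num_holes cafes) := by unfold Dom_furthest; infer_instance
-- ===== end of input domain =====

-- B sorts the cafes once and binary-searches the nearest cafe per hole with a running maximum,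
-- instead of A's full scan of all cafes for every hole.


-- ===== PORT A =====
def furthest (num_holes : Int) (cafes : List Int) : Int :=
  let distances2 := (PySem.List.pyRange 0 num_holes 1).foldl (fun acc hole =>
    let distances1 := cafes.foldl (fun a cafe => a ++ [|hole - cafe|]) []
    acc ++ [(PySem.List.min? distances1 (fun x => x)).getD 0]) []
  (PySem.List.max? distances2 (fun x => x)).getD 0

-- ===== PORT B =====
-- the hand-written 'while lo < hi' binary search of Source B
def lbLoop (cs : List Int) (h : Int) (lo hi : Nat) : Nat :=
  if lo < hi then
    let mid := (lo + hi) / 2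
    if cs.getD mid 0 < h then lbLoop cs h (mid + 1) hi else lbLoop cs h lo mid
  else lo
termination_by hi - lo
decreasing_by all_goals omega

def nearestB (cs : List Int) (n : Nat) (hole : Int) : Int :=
  let lo := lbLoop cs hole 0 n
  let cand := (if lo < n then [cs.getD lo 0 - hole] else []) ++
              (if 0 < lo then [hole - cs.getD (lo - 1) 0] else [])
  (PySem.List.min? cand (fun x => x)).getD 0

def furthest_alt (num_holes : Int) (cafes : List Int) : Int :=
  let cs := PySem.List.sorted cafes (fun x => x) false
  let n := cs.length
  let best := (PySem.List.pyRange 0 num_holes 1).foldl (fun best hole =>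
    let d := nearestB cs n hole
    match best with
    | none => some d
    | some b => if b < d then some d else some b) none
  best.getD 0

-- ===== PRECONDITION & SPEC =====
-- A raises ValueError when num_holes < 1 (max of an empty list) or cafes = [] (min of an empty list).
def Pre_furthest (num_holes : Int) (cafes : List Int) : Prop := 1 ≤ num_holes ∧ cafes ≠ []
instance (num_holes : Int) (cafes : List Int) : Decidable (Pre_furthest num_holes cafes) := by unfold Pre_furthest; infer_instance

def pvWitness_furthest : Int × List Int := (4, [1, 7, 2])

def Spec_furthest (num_holes : Int) (cafes : List Int) (out : Int) : Prop := out = furthest_alt num_holes cafes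
instance (num_holes : Int) (cafes : List Int) (out : Int) : Decidable (Spec_furthest num_holes cafes out) := by unfold Spec_furthest; infer_instance

-- ===== CLAIM (what is proved, stated in full; the proofs are below) =====
def Claim_equal_furthest : Prop := ∀ (num_holes : Int) (cafes : List Int), Dom_furthest num_holes cafes → Pre_furthest num_holes cafes → Spec_furthest num_holes cafes (furthest num_holes cafes)

-- ===== LEMMAS AND PROOFS =====

-- monotone indexing of a ≤-sorted list
theorem sorted_mono (cs : List Int) (hp : cs.Pairwise (· ≤ ·)) :
    ∀ i j (_ : i ≤ j) (hj : j < cs.length), cs[i]'(by omega) ≤ cs[j] := by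
  intro i j hij hj
  rcases Nat.lt_or_ge i j with hlt | hge
  · exact (List.pairwise_iff_getElem.mp hp) i j (by omega) hj hlt
  · have : i = j := by omega
    subst this; rfl

-- binary-search invariant: on a sorted list, lbLoop returns the first index in [lo, hi] whose element is ≥ h
theorem lbLoop_spec_aux (cs : List Int) (h : Int) (hp : cs.Pairwise (· ≤ ·)) :
    ∀ (n : Nat) (lo hi : Nat), hi - lo ≤ n → lo ≤ hi → hi ≤ cs.length →
      lo ≤ lbLoop cs h lo hi ∧ lbLoop cs h lo hi ≤ hi ∧
      (∀ j (hj : j < cs.length), j < lbLoop cs h lo hi → lo ≤ j → cs[j] < h) ∧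
      (∀ j (hj : j < cs.length), lbLoop cs h lo hi ≤ j → j < hi → h ≤ cs[j]) := by
  intro n
  induction n with
  | zero =>
    intro lo hi hfuel hlohi hhi
    have heq : ¬ lo < hi := by omega
    rw [lbLoop]
    simp only [heq, if_false]
    exact ⟨le_refl _, by omega, by omega, by omega⟩
  | succ n ih =>
    intro lo hi hfuel hlohi hhi
    rw [lbLoop]
    by_cases hlt : lo < hi
    · simp only [hlt, if_true]
      have hmlen : (lo + hi) / 2 < cs.length := by omega
      have hget : cs.getD ((lo + hi) / 2) 0 = cs[(lo + hi) / 2] := List.getD_eq_getElem cs 0 hmlen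
      by_cases hc : cs.getD ((lo + hi) / 2) 0 < h
      · simp only [hc, if_true]
        obtain ⟨h1, h2, h3, h4⟩ := ih ((lo + hi) / 2 + 1) hi (by omega) (by omega) hhi
        refine ⟨by omega, h2, ?_, h4⟩
        intro j hj hjr hjlo
        by_cases hjm : (lo + hi) / 2 + 1 ≤ j
        · exact h3 j hj hjr hjm
        · have hle : cs[j] ≤ cs[(lo + hi) / 2] := sorted_mono cs hp j ((lo + hi) / 2) (by omega) hmlen
          rw [hget] at hc; omega
      · simp only [hc, if_false]
        obtain ⟨h1, h2, h3, h4⟩ := ih lo ((lo + hi) / 2) (by omega) (by omega) (by omega)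
        refine ⟨h1, by omega, h3, ?_⟩
        intro j hj hjl hjr
        by_cases hjm : j < (lo + hi) / 2
        · exact h4 j hj hjl hjm
        · have hle : cs[(lo + hi) / 2] ≤ cs[j] := sorted_mono cs hp ((lo + hi) / 2) j (by omega) hj
          rw [hget] at hc; omega
    · simp only [hlt, if_false]
      exact ⟨le_refl _, by omega, by omega, by omega⟩

theorem lbLoop_spec (cs : List Int) (h : Int) (hp : cs.Pairwise (· ≤ ·)) :
    lbLoop cs h 0 cs.length ≤ cs.length ∧
    (∀ j (hj : j < cs.length), j < lbLoop cs h 0 cs.length → cs[j] < h) ∧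
    (∀ j (hj : j < cs.length), lbLoop cs h 0 cs.length ≤ j → h ≤ cs[j]) := by
  obtain ⟨h1, h2, h3, h4⟩ := lbLoop_spec_aux cs h hp cs.length 0 cs.length (by omega) (by omega) (le_refl _)
  exact ⟨h2, fun j hj hji => h3 j hj hji (Nat.zero_le j), fun j hj hji => h4 j hj hji hj⟩

-- the binary search computes exactly min(|hole - c| for c in cs) on a sorted nonempty cs
theorem nearest_min (cs : List Int) (hp : cs.Pairwise (· ≤ ·)) (hne : cs ≠ []) (hole : Int) :
    PySem.List.min? (cs.map (fun c => |hole - c|)) (fun x => x) = some (nearestB cs cs.length hole) := by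
  obtain ⟨hle, hbelow, habove⟩ := lbLoop_spec cs hole hp
  have hn : 0 < cs.length := List.length_pos_iff.mpr hne
  set i := lbLoop cs hole 0 cs.length with hi
  set cand := (if i < cs.length then [cs.getD i 0 - hole] else []) ++
              (if 0 < i then [hole - cs.getD (i - 1) 0] else []) with hcand
  have hcne : cand ≠ [] := by
    rcases Nat.lt_or_ge i cs.length with h | h
    · simp [hcand, h]
    · have h0 : 0 < i := by omega
      simp [hcand, h0]
  -- every candidate is a distance, and is a lower bound for all distances
  have hcand_props : ∀ x ∈ cand, (∃ c ∈ cs, x = |hole - c|) := by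
    intro x hx
    rw [hcand, List.mem_append] at hx
    rcases hx with hx | hx
    · rcases Nat.lt_or_ge i cs.length with h | h
      · simp only [h, if_true, List.mem_singleton] at hx
        refine ⟨cs[i], List.getElem_mem h, ?_⟩
        have hup := habove i h (le_refl i)
        rw [hx, List.getD_eq_getElem cs 0 h, abs_of_nonpos (by omega)]; ring
      · rw [if_neg (by omega)] at hx
        exact absurd hx List.not_mem_nil
    · rcases Nat.lt_or_ge 0 i with h | h
      · simp only [h, if_true, List.mem_singleton] at hx
        have him : i - 1 < cs.length := by omega
        refine ⟨cs[i-1], List.getElem_mem him, ?_⟩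
        have hlo := hbelow (i-1) him (by omega)
        rw [hx, List.getD_eq_getElem cs 0 him, abs_of_nonneg (by omega)]
      · rw [if_neg (by omega)] at hx
        exact absurd hx List.not_mem_nil
  -- the minimum of cand
  cases hm : PySem.List.min? cand (fun x => x) with
  | none => exact absurd ((PySem.List.min?_eq_none_iff cand _).mp hm) hcne
  | some d =>
    have hdmem := PySem.List.min?_mem hm
    have hdmin := PySem.List.min?_isMin hm
    have hd_lb : ∀ c ∈ cs, d ≤ |hole - c| := by
      intro c hc
      obtain ⟨j, hj, rfl⟩ := List.mem_iff_getElem.mp hc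
      rcases Nat.lt_or_ge j i with hji | hji
      · -- left of the split point: hole - cs[i-1] is the closest among them
        have h0 : 0 < i := by omega
        have him : i - 1 < cs.length := by omega
        have hcm : hole - cs.getD (i-1) 0 ∈ cand := by
          rw [hcand, List.mem_append]; right; simp [h0]
        have hmono : cs[j] ≤ cs[i-1] := sorted_mono cs hp j (i-1) (by omega) him
        have hlt := hbelow j hj hji
        have := hdmin _ hcm
        rw [List.getD_eq_getElem cs 0 him] at this
        rw [abs_of_nonneg (by omega)]
        omega
      · -- right of the split point: cs[i] - hole is the closest among them
        have hilen : i < cs.length := by omega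
        have hcm : cs.getD i 0 - hole ∈ cand := by
          rw [hcand, List.mem_append]; left; simp [hilen]
        have hmono : cs[i] ≤ cs[j] := sorted_mono cs hp i j hji hj
        have hge := habove j hj hji
        have := hdmin _ hcm
        rw [List.getD_eq_getElem cs 0 hilen] at this
        rw [abs_of_nonpos (by omega)]
        omega
    -- min over all distances equals d
    have hmapne : cs.map (fun c => |hole - c|) ≠ [] := by
      simpa using hne
    cases hm2 : PySem.List.min? (cs.map (fun c => |hole - c|)) (fun x => x) with
    | none => exact absurd ((PySem.List.min?_eq_none_iff _ _).mp hm2) hmapne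
    | some m =>
      have hmmem := PySem.List.min?_mem hm2
      have hmmin := PySem.List.min?_isMin hm2
      obtain ⟨c0, hc0, hdval⟩ := hcand_props d hdmem
      have h1 : m ≤ d := by
        have : |hole - c0| ∈ cs.map (fun c => |hole - c|) := List.mem_map_of_mem hc0
        have := hmmin _ this
        simp only at this; omega
      have h2 : d ≤ m := by
        obtain ⟨c1, hc1, rfl⟩ := List.mem_map.mp hmmem
        exact hd_lb c1 hc1
      have : m = d := le_antisymm h1 h2
      subst this
      simp only [nearestB]
      rw [← hi, ← hcand, hm]
      rfl

-- the value of min? over a permutation is unchanged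
theorem min?_id_eq_of_perm (l l' : List Int) (hperm : l.Perm l') {a b : Int}
    (ha : PySem.List.min? l (fun x => x) = some a)
    (hb : PySem.List.min? l' (fun x => x) = some b) : a = b := by
  have hal := PySem.List.min?_mem ha
  have hbl := PySem.List.min?_mem hb
  have hamin := PySem.List.min?_isMin ha
  have hbmin := PySem.List.min?_isMin hb
  exact le_antisymm (hamin b (hperm.symm.mem_iff.mp hbl)) (hbmin a (hperm.mem_iff.mp hal))

-- B's running-max accumulator over a cons list is a foldl max of the mapped values
theorem foldB_eq (f : Int → Int) :
    ∀ (l : List Int) (b : Int),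
      l.foldl (fun best hole =>
        match best with
        | none => some (f hole)
        | some b => if b < f hole then some (f hole) else some b) (some b)
      = some ((l.map f).foldl max b) := by
  intro l
  induction l with
  | nil => intro b; rfl
  | cons x t ih =>
    intro b
    simp only [List.foldl_cons, List.map_cons]
    have hstep : (if b < f x then some (f x) else some b) = some (max b (f x)) := by
      rcases lt_or_ge b (f x) with h | h
      · simp [h, max_eq_right (le_of_lt h)]
      · simp [show ¬ b < f x by omega, max_eq_left h]
    rw [hstep, ih]

-- ===== VERDICT (by name: the statement is the Claim_ definition above) =====
theorem furthest_spec : Claim_equal_furthest := by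
  intro num_holes cafes _ hpre
  obtain ⟨hnh, hcne⟩ := hpre
  unfold Spec_furthest
  have hperm := PySem.List.sorted_perm cafes (fun x => x) false
  have hp := PySem.List.sorted_pairwise cafes (fun x => x)
  have hcsne : PySem.List.sorted cafes (fun x => x) false ≠ [] := by
    intro h
    exact hcne ((PySem.List.sorted_eq_nil_iff cafes (fun x => x) false).mp h)
  -- per-hole: A's inner min-scan equals B's binary search on the sorted list
  have hhole : ∀ hole : Int,
      (PySem.List.min? (cafes.foldl (fun a cafe => a ++ [|hole - cafe|]) []) (fun x => x)).getD 0
        = nearestB (PySem.List.sorted cafes (fun x => x) false)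
            (PySem.List.sorted cafes (fun x => x) false).length hole := by
    intro hole
    rw [PySem.List.foldl_append_singleton_eq_map (fun cafe => |hole - cafe|) cafes [], List.nil_append]
    have hnm := nearest_min (PySem.List.sorted cafes (fun x => x) false) hp hcsne hole
    cases hm : PySem.List.min? (cafes.map (fun cafe => |hole - cafe|)) (fun x => x) with
    | none =>
      have : cafes.map (fun cafe => |hole - cafe|) = [] := (PySem.List.min?_eq_none_iff _ _).mp hm
      simp only [List.map_eq_nil_iff] at this
      exact absurd this hcne
    | some d =>
      have heq := min?_id_eq_of_perm _ _ (hperm.map (fun c => |hole - c|)) hnm hm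
      rw [← heq]
      rfl
  simp only [furthest, furthest_alt]
  rw [PySem.List.foldl_append_singleton_eq_map
        (fun hole => (PySem.List.min? (cafes.foldl (fun a cafe => a ++ [|hole - cafe|]) []) (fun x => x)).getD 0)
        (PySem.List.pyRange 0 num_holes 1) [], List.nil_append]
  rw [List.map_congr_left (fun hole _ => hhole hole)]
  rw [PySem.List.pyRange_one_cons (by omega : (0:Int) < num_holes)]
  rw [List.map_cons, PySem.List.max?_id_cons, List.foldl_cons]
  rw [foldB_eq (fun hole => nearestB (PySem.List.sorted cafes (fun x => x) false)
        (PySem.List.sorted cafes (fun x => x) false).length hole)]
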